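-- pv_equiv track=rewrite | github.com/jinyounng/ccqa_official | Benchmarks/CommonsenseQA/Run/commonsenseqa_generation.py | format_model_name
-- ===== SOURCE A (Python) =====
-- def format_model_name(model_name):
--     """Format model name to proper case (e.g., 'llama-3b' -> 'Llama-3B')"""
--     parts = model_name.split('-')
--     formatted_parts = []
--
--     for part in parts:
--         # Check if the part has digits at the end (like "3b")
--         if any(c.isdigit() for c in part):
--             # Find where digits start
--             for i, c in enumerate(part):
--                 if c.isdigit():
--                     digit_start = i
--                     break
--             else:
--                 digit_start = len(part)
--
--             # Capitalize the letter part and uppercase the size suffix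
--             letter_part = part[:digit_start].capitalize()
--             size_suffix = part[digit_start:].upper()
--             formatted_parts.append(f"{letter_part}{size_suffix}")
--         else:
--             # Just capitalize regular parts
--             formatted_parts.append(part.capitalize())
--
--     return '-'.join(formatted_parts)
-- ===== SOURCE B (Python) =====
-- def format_model_name(model_name):
--     """Format model name to proper case (e.g., 'llama-3b' -> 'Llama-3B')"""
--     out = []
--     word_start = True
--     in_suffix = False
--     for c in model_name:
--         if c == '-':
--             out.append(c)
--             word_start = True
--             in_suffix = False
--         elif in_suffix or c.isdigit():
--             out.append(c.upper())
--             in_suffix = True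
--         elif word_start:
--             out.append(c.upper())
--             word_start = False
--         else:
--             out.append(c.lower())
--     return ''.join(out)
-- ===== Notes on version B (the rewrite author's own statement) =====
-- stated objective: alternative
-- what changed: Replaces A's dash-splitting with per-part scanning (any() pre-check, digit-finding loop, slicing, join) by a single character-level pass over the whole string with two state flags (word_start, in_suffix) that decide upper/lower for each character; no splitting, slicing or joining of parts occurs.
import Mathlib
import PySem

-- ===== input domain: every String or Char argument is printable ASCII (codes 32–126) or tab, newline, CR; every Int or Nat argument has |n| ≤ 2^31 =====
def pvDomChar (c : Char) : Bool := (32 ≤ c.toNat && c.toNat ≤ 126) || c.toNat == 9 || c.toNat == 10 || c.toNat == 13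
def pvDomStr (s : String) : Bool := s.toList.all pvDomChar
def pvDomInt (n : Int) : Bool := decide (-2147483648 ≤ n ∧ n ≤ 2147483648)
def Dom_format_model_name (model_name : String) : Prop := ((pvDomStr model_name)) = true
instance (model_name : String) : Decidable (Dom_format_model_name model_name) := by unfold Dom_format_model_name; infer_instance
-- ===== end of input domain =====

-- B is an alternative algorithm: a single character-level pass with two state flags
-- (word_start, in_suffix) instead of A's split('-') / per-part scans / slices / join.

-- ===== PORT A =====
-- str.capitalize (exact on the ASCII domain): first char uppercased, rest lowered
def pvCapitalize (cs : List Char) : List Char :=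
  match cs with
  | [] => []
  | c :: rest => PySem.Chars.upperChar c :: PySem.Chars.lower rest

-- A's inner 'for i, c in enumerate(part): if c.isdigit(): digit_start = i; break / else: len(part)'
def pvFindDS : List Char → Nat → Nat
  | [], n => n
  | c :: rest, n => if PySem.Chars.isdigit c then n else pvFindDS rest (n + 1)

-- A's per-part body: any()-check, then slice at digit_start, else plain capitalize
def pvFmtA (part : List Char) : List Char :=
  if part.any PySem.Chars.isdigit then
    let digit_start : Nat := pvFindDS part 0
    let letter_part := pvCapitalize (PySem.Chars.slice part none (some (digit_start : Int)))
    let size_suffix := PySem.Chars.upper (PySem.Chars.slice part (some (digit_start : Int)) none)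
    letter_part ++ size_suffix
  else
    pvCapitalize part

def format_model_name (model_name : String) : String :=
  String.ofList (PySem.Chars.join ['-']
    ((PySem.Chars.splitOn model_name.toList ['-']).map pvFmtA))

-- ===== PORT B =====
-- Source B's loop: one pass over the characters, state (word_start, in_suffix);
-- the out-list accumulator + ''.join becomes the list built by the recursion.
def pvRunB : List Char → Bool → Bool → List Char
  | [], _, _ => []
  | c :: rest, word_start, in_suffix =>
    if c = '-' then c :: pvRunB rest true false
    else if in_suffix || PySem.Chars.isdigit c then
      PySem.Chars.upperChar c :: pvRunB rest word_start true
    else if word_start then PySem.Chars.upperChar c :: pvRunB rest false in_suffix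
    else PySem.Chars.lowerChar c :: pvRunB rest word_start in_suffix

def format_model_name_alt (model_name : String) : String :=
  String.ofList (pvRunB model_name.toList true false)

-- ===== PRECONDITION & SPEC =====
def Spec_format_model_name (model_name : String) (out : String) : Prop := out = format_model_name_alt model_name
instance (model_name : String) (out : String) : Decidable (Spec_format_model_name model_name out) := by unfold Spec_format_model_name; infer_instance

-- ===== CLAIM (what is proved, stated in full; the proofs are below) =====
def Claim_equal_format_model_name : Prop := ∀ (model_name : String), Dom_format_model_name model_name → Spec_format_model_name model_name (format_model_name model_name)

-- ===== LEMMAS AND PROOFS =====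

-- reference split of A's splitOn at '-' (structural, fuel-free)
def pvRefSplit : List Char → List (List Char)
  | [] => [[]]
  | c :: rest => if c = '-' then [] :: pvRefSplit rest
                 else (pvRefSplit rest).modifyHead (c :: ·)

theorem pvRefSplit_ne_nil (l : List Char) : pvRefSplit l ≠ [] := by
  cases l with
  | nil => simp [pvRefSplit]
  | cons c rest =>
    simp only [pvRefSplit]
    split
    · simp
    · cases h : pvRefSplit rest with
      | nil => exact absurd h (pvRefSplit_ne_nil rest)
      | cons a t => simp

-- final state of Source B's loop after consuming xs from state (ws, suf)
def pvStateB : List Char → Bool → Bool → Bool × Bool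
  | [], ws, suf => (ws, suf)
  | c :: rest, ws, suf =>
    if c = '-' then pvStateB rest true false
    else if suf || PySem.Chars.isdigit c then pvStateB rest ws true
    else if ws then pvStateB rest false suf
    else pvStateB rest ws suf

theorem pvRunB_append (xs ys : List Char) (ws suf : Bool) :
    pvRunB (xs ++ ys) ws suf
      = pvRunB xs ws suf ++ pvRunB ys (pvStateB xs ws suf).1 (pvStateB xs ws suf).2 := by
  induction xs generalizing ws suf with
  | nil => simp [pvRunB, pvStateB]
  | cons c rest ih =>
    simp only [List.cons_append, pvRunB, pvStateB]
    split_ifs <;> simp [ih]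

theorem pvRunB_suffix (p : List Char) (ws : Bool) (hp : '-' ∉ p) :
    pvRunB p ws true = PySem.Chars.upper p := by
  induction p generalizing ws with
  | nil => simp [pvRunB, PySem.Chars.upper]
  | cons c rest ih =>
    have hc : c ≠ '-' := fun h => hp (h ▸ List.mem_cons_self)
    simp [pvRunB, hc, PySem.Chars.upper, ih ws (fun h => hp (List.mem_cons_of_mem _ h))]

theorem pvRunB_lower (p : List Char) (hp : '-' ∉ p) :
    pvRunB p false false
      = PySem.Chars.lower (p.take (p.findIdx PySem.Chars.isdigit))
        ++ PySem.Chars.upper (p.drop (p.findIdx PySem.Chars.isdigit)) := by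
  induction p with
  | nil => simp [pvRunB, PySem.Chars.lower, PySem.Chars.upper]
  | cons c rest ih =>
    have hc : c ≠ '-' := fun h => hp (h ▸ List.mem_cons_self)
    have hrest : '-' ∉ rest := fun h => hp (List.mem_cons_of_mem _ h)
    by_cases hd : PySem.Chars.isdigit c
    · simp [pvRunB, hc, hd, List.findIdx_cons, PySem.Chars.upper, PySem.Chars.lower,
        pvRunB_suffix rest false hrest]
    · simp [pvRunB, hc, hd, List.findIdx_cons, PySem.Chars.upper, PySem.Chars.lower, ih hrest]

theorem pvRunB_fresh (p : List Char) (hp : '-' ∉ p) :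
    pvRunB p true false
      = pvCapitalize (p.take (p.findIdx PySem.Chars.isdigit))
        ++ PySem.Chars.upper (p.drop (p.findIdx PySem.Chars.isdigit)) := by
  cases p with
  | nil => simp [pvRunB, pvCapitalize, PySem.Chars.upper]
  | cons c rest =>
    have hc : c ≠ '-' := fun h => hp (h ▸ List.mem_cons_self)
    have hrest : '-' ∉ rest := fun h => hp (List.mem_cons_of_mem _ h)
    by_cases hd : PySem.Chars.isdigit c
    · simp [pvRunB, hc, hd, List.findIdx_cons, pvCapitalize, PySem.Chars.upper,
        pvRunB_suffix rest true hrest]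
    · simp [pvRunB, hc, hd, List.findIdx_cons, pvCapitalize, PySem.Chars.upper,
        pvRunB_lower rest hrest]

-- A's per-part result in closed per-character form
theorem pvFindDS_eq (cs : List Char) (n : Nat) :
    pvFindDS cs n = n + cs.findIdx PySem.Chars.isdigit := by
  induction cs generalizing n with
  | nil => simp [pvFindDS]
  | cons c rest ih =>
    simp only [pvFindDS]
    by_cases h : PySem.Chars.isdigit c
    · simp [h, List.findIdx_cons]
    · simp [h, ih, List.findIdx_cons]
      omega

theorem pvFindIdx_eq_length_of_not_any (cs : List Char)
    (h : cs.any PySem.Chars.isdigit = false) :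
    cs.findIdx PySem.Chars.isdigit = cs.length := by
  apply List.findIdx_eq_length.mpr
  intro c hc
  have := List.any_eq_false.mp h c hc
  simpa using this

theorem pvFmtA_char (part : List Char) :
    pvFmtA part
      = pvCapitalize (part.take (part.findIdx PySem.Chars.isdigit))
        ++ PySem.Chars.upper (part.drop (part.findIdx PySem.Chars.isdigit)) := by
  unfold pvFmtA
  by_cases h : part.any PySem.Chars.isdigit
  · simp only [h, if_pos, pvFindDS_eq, Nat.zero_add,
      PySem.Chars.slice_eq_listSlice, PySem.List.slice_to_natCast, PySem.List.slice_from_natCast]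
  · simp only [Bool.not_eq_true] at h
    rw [if_neg (by simp [h]), pvFindIdx_eq_length_of_not_any part h]
    simp [PySem.Chars.upper]

theorem pvRunB_part (p : List Char) (hp : '-' ∉ p) : pvRunB p true false = pvFmtA p := by
  rw [pvFmtA_char, pvRunB_fresh p hp]

-- splitOn at '-' computes pvRefSplit
theorem pvGo_eq (fuel : Nat) :
    ∀ (l cur : List Char) (acc : List (List Char)), l.length ≤ fuel →
      PySem.Chars.splitOn.go ['-'] fuel l cur acc
        = acc.reverse ++ (pvRefSplit l).modifyHead (cur.reverse ++ ·) := by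
  induction fuel with
  | zero =>
    intro l cur acc hl
    have : l = [] := List.length_eq_zero_iff.mp (Nat.le_zero.mp hl)
    subst this
    simp [PySem.Chars.splitOn.go, pvRefSplit]
  | succ f ih =>
    intro l cur acc hl
    cases l with
    | nil => simp [PySem.Chars.splitOn.go, pvRefSplit]
    | cons c rest =>
      simp only [PySem.Chars.splitOn.go]
      by_cases hc : c = '-'
      · subst hc
        rw [if_pos (by simp [List.isPrefixOf])]
        rw [ih _ _ _ (by simpa using Nat.le_of_succ_le_succ (by simpa using hl))]
        simp only [pvRefSplit]
        cases h : pvRefSplit rest with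
        | nil => exact absurd h (pvRefSplit_ne_nil rest)
        | cons a t => simp [h]
      · rw [if_neg (by simp [List.isPrefixOf]; exact fun h => hc h.symm)]
        rw [ih _ _ _ (by simpa using Nat.le_of_succ_le_succ (by simpa using hl))]
        simp only [pvRefSplit, if_neg hc]
        cases h : pvRefSplit rest with
        | nil => exact absurd h (pvRefSplit_ne_nil rest)
        | cons a t => simp

theorem pvSplitOn_eq (s : List Char) : PySem.Chars.splitOn s ['-'] = pvRefSplit s := by
  unfold PySem.Chars.splitOn
  rw [pvGo_eq (s.length + 1) s [] [] (Nat.le_succ _)]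
  cases h : pvRefSplit s with
  | nil => exact absurd h (pvRefSplit_ne_nil s)
  | cons a t => simp

-- the main invariant: the machine run on p ++ cs (p the dash-free part prefix already
-- consumed) equals A's join/map over the reference split with p glued onto the first part
theorem pvMain (cs : List Char) :
    ∀ p : List Char, '-' ∉ p →
      pvRunB (p ++ cs) true false
        = PySem.Chars.join ['-'] (((pvRefSplit cs).modifyHead (p ++ ·)).map pvFmtA) := by
  induction cs with
  | nil =>
    intro p hp
    simp [pvRefSplit, PySem.Chars.join, List.intercalate, pvRunB_part p hp]
  | cons c rest ih =>
    intro p hp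
    by_cases hc : c = '-'
    · subst hc
      rw [pvRunB_append p ('-' :: rest) true false]
      have h1 : pvRunB ('-' :: rest) (pvStateB p true false).1 (pvStateB p true false).2
          = '-' :: pvRunB rest true false := by
        simp [pvRunB]
      have h2 := ih [] (by simp)
      have h2' : pvRunB rest true false
          = PySem.Chars.join ['-'] ((pvRefSplit rest).map pvFmtA) := by
        rw [show pvRunB rest true false = pvRunB ([] ++ rest) true false by simp, h2]
        congr 2
        cases h : pvRefSplit rest <;> simp
      rw [h1, pvRunB_part p hp, h2']
      rw [show pvRefSplit ('-' :: rest) = [] :: pvRefSplit rest from by simp [pvRefSplit]]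
      cases h : pvRefSplit rest with
      | nil => exact absurd h (pvRefSplit_ne_nil rest)
      | cons a t =>
        simp only [List.modifyHead_cons, List.append_nil, List.map_cons]
        rw [PySem.Chars.join_cons_cons]
        simp
    · have hpc : '-' ∉ p ++ [c] := by
        intro h
        rcases List.mem_append.mp h with h | h
        · exact hp h
        · simp only [List.mem_singleton] at h
          exact hc h.symm
      have := ih (p ++ [c]) hpc
      rw [show p ++ c :: rest = (p ++ [c]) ++ rest by simp] at *
      rw [this]
      congr 2
      simp only [pvRefSplit, if_neg hc]
      cases h : pvRefSplit rest with
      | nil => exact absurd h (pvRefSplit_ne_nil rest)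
      | cons a t => simp

-- ===== VERDICT (by name: the statement is the Claim_ definition above) =====
theorem format_model_name_spec : Claim_equal_format_model_name := by
  intro s _
  unfold Spec_format_model_name format_model_name format_model_name_alt
  congr 1
  rw [pvSplitOn_eq]
  have := pvMain s.toList [] (by simp)
  simp only [List.nil_append] at this
  rw [this]
  congr 1
  cases h : pvRefSplit s.toList <;> simp
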